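-- pv_equiv track=rewrite | github.com/ajinthampi-06/pythondjangoluminar | assesment1/question6.py | getMaxOccuringChar
-- ===== SOURCE A (Python) =====
-- ASCII_SIZE = 256
--
-- def getMaxOccuringChar(str):
--
--     count = [0] * ASCII_SIZE
--
--
--     max = -1
--     c = ''
--
--
--     for i in str:
--         count[ord(i)] += 1
--
--     for i in str:
--         if max < count[ord(i)]:
--             max = count[ord(i)]
--             c = i
--
--     return c
-- ===== SOURCE B (Python) =====
-- def getMaxOccuringChar(str):
--     best, bestcount = '', 0
--     for ch in dict.fromkeys(str):       # distinct characters, first-occurrence order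
--         c = str.count(ch)
--         if c > bestcount:
--             best, bestcount = ch, c
--     return best
-- ===== Notes on version B (the rewrite author's own statement) =====
-- stated objective: simpler
-- what changed: B drops the 256-entry ASCII count table and both of A's table passes entirely: it iterates the distinct characters in first-occurrence order (dict.fromkeys) and keeps the first one whose str.count strictly improves the running best.
import Mathlib
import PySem

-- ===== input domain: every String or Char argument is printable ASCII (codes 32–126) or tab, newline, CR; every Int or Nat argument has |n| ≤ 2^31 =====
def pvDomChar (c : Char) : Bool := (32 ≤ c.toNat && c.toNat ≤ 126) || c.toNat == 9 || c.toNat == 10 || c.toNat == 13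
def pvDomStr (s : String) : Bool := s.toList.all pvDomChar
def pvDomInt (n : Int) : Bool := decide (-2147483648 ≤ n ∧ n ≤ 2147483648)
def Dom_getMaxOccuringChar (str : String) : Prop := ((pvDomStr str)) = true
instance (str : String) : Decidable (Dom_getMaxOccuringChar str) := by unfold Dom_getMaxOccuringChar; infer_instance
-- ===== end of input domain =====

-- B drops the 256-entry count table and both of A's table passes: it scans the distinct
-- characters in first-occurrence order (dict.fromkeys) and keeps the first whose str.count
-- strictly improves the running best (simpler; same result on the stated domain).

-- ===== PORT A =====
-- the first loop: count[ord(i)] += 1 over a 256-entry table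
def pvBuildCount (cs : List Char) (t : List Int) : List Int :=
  cs.foldl (fun cnt i => cnt.set i.toNat (cnt.getD i.toNat 0 + 1)) t

def getMaxOccuringChar (str : String) : String :=
  let count := pvBuildCount str.toList (List.replicate 256 (0 : Int))
  -- for i in str: if max < count[ord(i)]: max, c = count[ord(i)], i
  (str.toList.foldl
    (fun (s : Int × String) i =>
      if s.1 < count.getD i.toNat 0 then (count.getD i.toNat 0, i.toString) else s)
    (-1, "")).2

-- ===== PORT B =====
def getMaxOccuringChar_alt (str : String) : String :=
  -- for ch in dict.fromkeys(str): c = str.count(ch); if c > bestcount: best, bestcount = ch, c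
  ((PySem.List.dedup str.toList).foldl
    (fun (s : String × Int) ch =>
      if s.2 < ((PySem.Str.count str ch.toString : Nat) : Int)
      then (ch.toString, ((PySem.Str.count str ch.toString : Nat) : Int)) else s)
    ("", 0)).1

-- ===== PRECONDITION & SPEC =====
def Spec_getMaxOccuringChar (str : String) (out : String) : Prop := out = getMaxOccuringChar_alt str
instance (str : String) (out : String) : Decidable (Spec_getMaxOccuringChar str out) := by unfold Spec_getMaxOccuringChar; infer_instance

-- ===== CLAIM (what is proved, stated in full; the proofs are below) =====
def Claim_equal_getMaxOccuringChar : Prop := ∀ (str : String), Dom_getMaxOccuringChar str → Spec_getMaxOccuringChar str (getMaxOccuringChar str)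

-- ===== LEMMAS AND PROOFS =====

-- str.count(c) for a one-character pattern is the number of occurrences of c
theorem pvCountGo (c : Char) (l : List Char) (fuel acc : Nat) (h : l.length ≤ fuel) :
    PySem.Chars.count.go [c] fuel l acc = acc + l.count c := by
  induction l generalizing fuel acc with
  | nil => cases fuel <;> simp [PySem.Chars.count.go]
  | cons a t ih =>
    cases fuel with
    | zero => simp at h
    | succ f =>
      simp only [PySem.Chars.count.go]
      by_cases hac : c = a
      · subst hac
        simp only [List.isPrefixOf, Bool.and_true, beq_self_eq_true,
          if_pos, List.length_cons, List.drop_succ_cons]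
        simp only [List.length_nil, List.drop_zero]
        rw [ih _ _ (by simpa using h)]
        simp
        omega
      · have hpre : [c].isPrefixOf (a :: t) = false := by
          simp [List.isPrefixOf, hac]
        rw [hpre]
        simp only [Bool.false_eq_true, if_false]
        rw [ih _ _ (by simpa using h)]
        simp [Ne.symm hac]

theorem pvStrCount_single (s : String) (c : Char) :
    PySem.Str.count s c.toString = s.toList.count c := by
  have ht : c.toString.toList = [c] := Eq.symm (String.ofList_eq.mp rfl)
  have : PySem.Str.count s c.toString = PySem.Chars.count s.toList c.toString.toList := by simp
  rw [this, ht]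
  unfold PySem.Chars.count
  simp only [List.isEmpty_cons, Bool.false_eq_true, if_false]
  rw [pvCountGo c s.toList s.toList.length 0 le_rfl, Nat.zero_add]

-- the table entry at n (< 256) counts the characters with code n
theorem pvBuildCount_getD (cs : List Char) (t : List Int) (n : Nat)
    (hl : t.length = 256) (hn : n < 256) :
    (pvBuildCount cs t).getD n 0 = t.getD n 0 + (cs.countP (fun ch => ch.toNat == n) : Int) := by
  induction cs generalizing t with
  | nil => simp [pvBuildCount]
  | cons ch cs ih =>
    simp only [pvBuildCount, List.foldl_cons] at *
    rw [ih _ (by simp [hl]) ]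
    by_cases h : ch.toNat = n
    · subst h
      simp [List.getD, hl, hn]
      omega
    · simp [List.getD, h]

-- the table entry at a character's code is the character's count (Char.toNat is injective)
theorem pvTbl_count (cs : List Char) (ch : Char) (h : ch.toNat < 256) :
    (pvBuildCount cs (List.replicate 256 (0 : Int))).getD ch.toNat 0 = (cs.count ch : Int) := by
  rw [pvBuildCount_getD _ _ _ List.length_replicate h,
      List.getD_eq_getElem _ _ (by rw [List.length_replicate]; exact h),
      List.getElem_replicate, zero_add]
  congr 1
  have hfun : (fun x : Char => x.toNat == ch.toNat) = (fun x : Char => x == ch) := by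
    funext x
    by_cases hx : x = ch
    · simp [hx]
    · have hne : x.toNat ≠ ch.toNat := fun he => hx (Char.ext (UInt32.toNat_inj.mp he))
      simp [hx, hne]
  rw [hfun, List.count_eq_countP]

-- the running max of a projection is the initial value or is attained by a list element
theorem pvFoldMaxAttained (f : Char → Int) (cs : List Char) (m : Int) :
    cs.foldl (fun a ch => max a (f ch)) m = m ∨
    ∃ ch ∈ cs, cs.foldl (fun a ch => max a (f ch)) m = f ch := by
  induction cs generalizing m with
  | nil => left; rfl
  | cons c t ih =>
    simp only [List.foldl_cons]
    rcases ih (max m (f c)) with h | ⟨ch, hch, he⟩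
    · rcases max_cases m (f c) with ⟨h1, _⟩ | ⟨h1, _⟩
      · left; rw [h, h1]
      · right; exact ⟨c, List.mem_cons_self .., by rw [h, h1]⟩
    · right; exact ⟨ch, List.mem_cons_of_mem _ hch, he⟩

-- find? respects pointwise-equal predicates
theorem pvFindCongr {α : Type} (p q : α → Bool) (l : List α)
    (h : ∀ x ∈ l, p x = q x) : l.find? p = l.find? q := by
  induction l with
  | nil => rfl
  | cons a t ih =>
    simp only [List.find?]
    rw [h a (List.mem_cons_self ..), ih (fun x hx => h x (List.mem_cons_of_mem _ hx))]

-- A's strict-improvement scan, characterised: final max is the fold of max, final c is the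
-- first character that strictly improves to the overall max (or the initial c if none does)
theorem pvScanA_spec (f : Char → Int) (cs : List Char) (m : Int) (c : String) :
    cs.foldl (fun (s : Int × String) i => if s.1 < f i then (f i, i.toString) else s) (m, c)
      = (cs.foldl (fun a ch => max a (f ch)) m,
         match cs.find? (fun ch => decide (m < f ch) && (f ch == cs.foldl (fun a ch => max a (f ch)) m)) with
         | some ch => ch.toString
         | none => c) := by
  induction cs generalizing m c with
  | nil => rfl
  | cons ch cs ih =>
    have hM := PySem.List.le_foldl_max_int cs f (max m (f ch))
    simp only [List.foldl_cons, List.find?]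
    by_cases h : m < f ch
    · rw [if_pos h, ih]
      have hmax : max m (f ch) = f ch := by omega
      rw [hmax] at hM ⊢
      by_cases he : f ch = cs.foldl (fun a ch => max a (f ch)) (f ch)
      · rw [← he]
        have hfind : cs.find? (fun ch' => decide (f ch < f ch') && (f ch' == f ch)) = none := by
          rw [List.find?_eq_none]
          intro x hx
          simp only [Bool.and_eq_true, decide_eq_true_eq, beq_iff_eq, not_and]
          intro hlt hex
          omega
        simp [hfind, h]
      · have hcond : (decide (m < f ch) && (f ch == cs.foldl (fun a ch => max a (f ch)) (f ch))) = false := by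
          simp [h, he]
        rw [hcond]
        simp only []
        have hge : f ch ≤ cs.foldl (fun a ch => max a (f ch)) (f ch) := hM.1
        have hlt : f ch < cs.foldl (fun a ch => max a (f ch)) (f ch) := by
          rcases lt_or_eq_of_le hge with h' | h'
          · exact h'
          · exact absurd h' he
        have hcong : cs.find? (fun ch' => decide (f ch < f ch') && (f ch' == cs.foldl (fun a ch => max a (f ch)) (f ch)))
            = cs.find? (fun ch' => decide (m < f ch') && (f ch' == cs.foldl (fun a ch => max a (f ch)) (f ch))) := by
          apply pvFindCongr
          intro x hx
          by_cases hxe : f x = cs.foldl (fun a ch => max a (f ch)) (f ch)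
          · have h1 : decide (f ch < f x) = true := by rw [hxe]; exact decide_eq_true hlt
            have h2 : decide (m < f x) = true := by
              apply decide_eq_true; rw [hxe]; omega
            rw [h1, h2]
          · have h3 : (f x == cs.foldl (fun a ch => max a (f ch)) (f ch)) = false := by
              exact beq_eq_false_iff_ne.mpr hxe
            rw [h3, Bool.and_false, Bool.and_false]
        rw [hcong]
        obtain ⟨x, hx, hxM⟩ : ∃ x ∈ cs, cs.foldl (fun a ch => max a (f ch)) (f ch) = f x := by
          rcases pvFoldMaxAttained f cs (f ch) with h' | h'
          · exact absurd h'.symm he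
          · exact h'
        cases hfy : cs.find? (fun ch' => decide (m < f ch') && (f ch' == cs.foldl (fun a ch => max a (f ch)) (f ch))) with
        | some y => rfl
        | none =>
          exfalso
          have := List.find?_eq_none.mp hfy x hx
          simp only [Bool.and_eq_true, decide_eq_true_eq, beq_iff_eq, not_and] at this
          have h2 := this (by omega)
          exact h2 hxM.symm
    · rw [if_neg h, ih]
      have hmax : max m (f ch) = m := by omega
      rw [hmax]
      have hc : decide (m < f ch) = false := by simp [h]
      rw [hc, Bool.false_and]

-- B's strict-improvement scan (state (best, bestcount)), same characterisation
theorem pvScanB_spec (f : Char → Int) (cs : List Char) (m : Int) (c : String) :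
    cs.foldl (fun (s : String × Int) i => if s.2 < f i then (i.toString, f i) else s) (c, m)
      = (match cs.find? (fun ch => decide (m < f ch) && (f ch == cs.foldl (fun a ch => max a (f ch)) m)) with
         | some ch => ch.toString
         | none => c,
         cs.foldl (fun a ch => max a (f ch)) m) := by
  -- B's scan is A's scan with the pair components swapped
  have hswap : ∀ (l : List Char) (s : String × Int),
      l.foldl (fun (s : String × Int) i => if s.2 < f i then (i.toString, f i) else s) s
        = ((l.foldl (fun (s : Int × String) i => if s.1 < f i then (f i, i.toString) else s) (s.2, s.1)).2,
           (l.foldl (fun (s : Int × String) i => if s.1 < f i then (f i, i.toString) else s) (s.2, s.1)).1) := by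
    intro l
    induction l with
    | nil => intro s; rfl
    | cons a t ih =>
      intro s
      simp only [List.foldl_cons]
      by_cases h : s.2 < f a
      · rw [if_pos h, if_pos h, ih]
      · rw [if_neg h, if_neg h, ih]
  rw [hswap cs (c, m), pvScanA_spec]

-- a positive count is witnessed by a character of the string
theorem pvCount_pos_exists (cs : List Char) (ch : Char) (hch : ch ∈ cs) :
    (1 : Int) ≤ (cs.count ch : Int) := by
  have : 0 < cs.count ch := List.count_pos_iff.mpr hch
  exact_mod_cast this

-- Set.add appends an unseen element and ignores a seen one
theorem pvAdd_mem (acc : List Char) (a : Char) (h : a ∈ acc) : PySem.Set.add acc a = acc := by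
  unfold PySem.Set.add PySem.Set.contains
  simp [h]

theorem pvAdd_not_mem (acc : List Char) (a : Char) (h : a ∉ acc) :
    PySem.Set.add acc a = acc ++ [a] := by
  unfold PySem.Set.add PySem.Set.contains
  simp [h]

-- the dedup fold only appends to its accumulator
theorem pvDedupPrefix (cs : List Char) (acc : List Char) :
    ∃ r, cs.foldl PySem.Set.add acc = acc ++ r := by
  induction cs generalizing acc with
  | nil => exact ⟨[], by simp⟩
  | cons a t ih =>
    simp only [List.foldl_cons]
    by_cases h : a ∈ acc
    · rw [pvAdd_mem acc a h]
      exact ih acc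
    · rw [pvAdd_not_mem acc a h]
      rcases ih (acc ++ [a]) with ⟨r, hr⟩
      exact ⟨a :: r, by simpa using hr⟩

-- find? over the dedup of cs finds the same element as find? over cs
theorem pvDedupFindAux (p : Char → Bool) (cs acc : List Char)
    (h : ∀ a ∈ acc, p a = false) :
    (cs.foldl PySem.Set.add acc).find? p = cs.find? p := by
  induction cs generalizing acc with
  | nil => exact List.find?_eq_none.mpr (fun x hx => by simp [h x hx])
  | cons a t ih =>
    simp only [List.foldl_cons, List.find?]
    by_cases hp : p a = true
    · rw [hp]
      simp only []
      have hna : a ∉ acc := fun hmem => by rw [h a hmem] at hp; exact Bool.false_ne_true hp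
      have hstep : PySem.Set.add acc a = acc ++ [a] := pvAdd_not_mem acc a hna
      rcases pvDedupPrefix t (PySem.Set.add acc a) with ⟨r, hr⟩
      rw [hr, hstep, List.append_assoc, List.find?_append,
          List.find?_eq_none.mpr (fun x hx => by simp [h x hx]), Option.none_or]
      simp [hp]
    · have hp' : p a = false := by revert hp; cases p a <;> simp
      rw [hp']
      simp only []
      apply ih
      intro x hx
      have : x ∈ acc ∨ x = a := (PySem.Set.mem_add acc a x).mp hx
      rcases this with hx' | hx'
      · exact h x hx'
      · rw [hx']; exact hp'

theorem pvDedupFind (p : Char → Bool) (cs : List Char) :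
    (PySem.List.dedup cs).find? p = cs.find? p := by
  unfold PySem.List.dedup PySem.Set.ofList
  exact pvDedupFindAux p cs _ (by intro a ha; simp [PySem.Set.empty] at ha)

-- the two running maxima agree: over the string from -1 and over its dedup from 0
theorem pvMaxAgree (f : Char → Int) (cs : List Char) (hne : cs ≠ [])
    (hpos : ∀ ch ∈ cs, (1 : Int) ≤ f ch) :
    cs.foldl (fun a ch => max a (f ch)) (-1)
      = (PySem.List.dedup cs).foldl (fun a ch => max a (f ch)) 0 := by
  obtain ⟨c0, hc0⟩ : ∃ c, c ∈ cs := by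
    cases cs with
    | nil => exact absurd rfl hne
    | cons a t => exact ⟨a, List.mem_cons_self ..⟩
  have hA := PySem.List.le_foldl_max_int cs f (-1)
  have hB := PySem.List.le_foldl_max_int (PySem.List.dedup cs) f 0
  have hc0d : c0 ∈ PySem.List.dedup cs := (PySem.List.mem_dedup cs c0).mpr hc0
  obtain ⟨ca, hca, hcae⟩ : ∃ ch ∈ cs, cs.foldl (fun a ch => max a (f ch)) (-1) = f ch := by
    rcases pvFoldMaxAttained f cs (-1) with h | h
    · exfalso
      have := hA.2 c0 hc0
      have := hpos c0 hc0
      omega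
    · exact h
  obtain ⟨cb, hcb, hcbe⟩ : ∃ ch ∈ PySem.List.dedup cs,
      (PySem.List.dedup cs).foldl (fun a ch => max a (f ch)) 0 = f ch := by
    rcases pvFoldMaxAttained f (PySem.List.dedup cs) 0 with h | h
    · exfalso
      have := hB.2 c0 hc0d
      have := hpos c0 hc0
      omega
    · exact h
  have h1 : f ca ≤ (PySem.List.dedup cs).foldl (fun a ch => max a (f ch)) 0 :=
    hB.2 ca ((PySem.List.mem_dedup cs ca).mpr hca)
  have h2 : f cb ≤ cs.foldl (fun a ch => max a (f ch)) (-1) :=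
    hA.2 cb ((PySem.List.mem_dedup cs cb).mp hcb)
  omega

-- main theorem body
theorem pv_main (str : String) (hdom : Dom_getMaxOccuringChar str) :
    getMaxOccuringChar str = getMaxOccuringChar_alt str := by
  have hchars : ∀ ch ∈ str.toList, ch.toNat < 256 := by
    intro ch hch
    have := (List.all_eq_true.mp hdom) ch hch
    simp only [pvDomChar, Bool.or_eq_true, Bool.and_eq_true, decide_eq_true_eq, beq_iff_eq] at this
    omega
  unfold getMaxOccuringChar getMaxOccuringChar_alt
  show (str.toList.foldl
      (fun (s : Int × String) i =>
        if s.1 < (pvBuildCount str.toList (List.replicate 256 (0 : Int))).getD i.toNat 0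
        then ((pvBuildCount str.toList (List.replicate 256 (0 : Int))).getD i.toNat 0, i.toString) else s)
      (-1, "")).2
    = ((PySem.List.dedup str.toList).foldl
        (fun (s : String × Int) ch =>
          if s.2 < ((PySem.Str.count str ch.toString : Nat) : Int)
          then (ch.toString, ((PySem.Str.count str ch.toString : Nat) : Int)) else s)
        ("", 0)).1
  set cs := str.toList with hcs
  -- both scans compare the same quantity: the count of the scanned character
  have hfA : ∀ (s : Int × String), ∀ i ∈ cs,
      (if s.1 < (pvBuildCount cs (List.replicate 256 (0 : Int))).getD i.toNat 0
       then ((pvBuildCount cs (List.replicate 256 (0 : Int))).getD i.toNat 0, i.toString) else s)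
      = (if s.1 < (cs.count i : Int) then ((cs.count i : Int), i.toString) else s) := by
    intro s i hi
    rw [pvTbl_count cs i (hchars i hi)]
  rw [PySem.List.foldl_congr_mem cs _ _ (-1, "") hfA]
  have hfB : (fun (s : String × Int) ch =>
      if s.2 < ((PySem.Str.count str ch.toString : Nat) : Int)
      then (ch.toString, ((PySem.Str.count str ch.toString : Nat) : Int)) else s)
      = (fun (s : String × Int) ch =>
      if s.2 < (cs.count ch : Int) then (ch.toString, (cs.count ch : Int)) else s) := by
    funext s ch
    rw [pvStrCount_single str ch, hcs]
  rw [hfB]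
  rw [pvScanA_spec (fun i => (cs.count i : Int)) cs (-1) "",
      pvScanB_spec (fun i => (cs.count i : Int)) (PySem.List.dedup cs) 0 ""]
  cases hcse : cs with
  | nil => simp [PySem.List.dedup, PySem.Set.ofList, PySem.Set.empty]
  | cons c0 cst =>
    rw [← hcse]
    have hne : cs ≠ [] := by rw [hcse]; exact List.cons_ne_nil _ _
    have hpos : ∀ ch ∈ cs, (1 : Int) ≤ (cs.count ch : Int) := fun ch hch => pvCount_pos_exists cs ch hch
    have hM := pvMaxAgree (fun i => (cs.count i : Int)) cs hne hpos
    -- both find? predicates reduce to "count equals the common maximum"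
    have hpA : cs.find? (fun ch => decide ((-1 : Int) < (cs.count ch : Int))
          && ((cs.count ch : Int) == cs.foldl (fun a ch => max a ((cs.count ch : Int))) (-1)))
        = cs.find? (fun ch => (cs.count ch : Int) == cs.foldl (fun a ch => max a ((cs.count ch : Int))) (-1)) := by
      apply pvFindCongr
      intro x hx
      have := hpos x hx
      have h1 : decide ((-1 : Int) < (cs.count x : Int)) = true := decide_eq_true (by omega)
      rw [h1, Bool.true_and]
    have hpB : (PySem.List.dedup cs).find? (fun ch => decide ((0 : Int) < (cs.count ch : Int))
          && ((cs.count ch : Int) == (PySem.List.dedup cs).foldl (fun a ch => max a ((cs.count ch : Int))) 0))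
        = (PySem.List.dedup cs).find? (fun ch => (cs.count ch : Int) == cs.foldl (fun a ch => max a ((cs.count ch : Int))) (-1)) := by
      apply pvFindCongr
      intro x hx
      have hxcs : x ∈ cs := (PySem.List.mem_dedup cs x).mp hx
      have := hpos x hxcs
      have h1 : decide ((0 : Int) < (cs.count x : Int)) = true := decide_eq_true (by omega)
      rw [h1, Bool.true_and, hM]
    rw [hpA, hpB, pvDedupFind]

-- ===== VERDICT (by name: the statement is the Claim_ definition above) =====
theorem getMaxOccuringChar_spec : Claim_equal_getMaxOccuringChar := by
  intro str hdom
  unfold Spec_getMaxOccuringChar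
  exact pv_main str hdom
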